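-- pv_equiv track=rewrite | github.com/virajxp1/auto-browse | agent/run.py | _match_table_value
-- ===== SOURCE A (Python) =====
-- def _match_table_value(rows: list[tuple[str, str]], aliases: list[str]) -> tuple[str | None, str | None]:
--     best_score = 0
--     best_value: str | None = None
--     best_key: str | None = None
--     for alias in aliases:
--         alias_lower = alias.lower()
--         for key, value in rows:
--             key_lower = key.lower()
--             score = 0
--             if key_lower == alias_lower:
--                 score = 3
--             elif key_lower.startswith(f"{alias_lower} "):
--                 score = 2
--             elif alias_lower in key_lower:
--                 score = 1
--
--             if score > best_score:
--                 best_score = score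
--                 best_value = value
--                 best_key = key
--                 if score == 3:
--                     return best_value, best_key
--     return best_value, best_key
-- ===== SOURCE B (Python) =====
-- def _match_table_value(rows: list[tuple[str, str]], aliases: list[str]) -> tuple[str | None, str | None]:
--     # Three priority-ordered scans instead of one max-tracking pass:
--     # exact match first, then prefix ("alias "), then substring.
--     for alias in aliases:
--         alias_lower = alias.lower()
--         for key, value in rows:
--             if key.lower() == alias_lower:
--                 return value, key
--     for alias in aliases:
--         prefix = alias.lower() + " "
--         for key, value in rows:
--             if key.lower().startswith(prefix):
--                 return value, key
--     for alias in aliases: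
--         alias_lower = alias.lower()
--         for key, value in rows:
--             if alias_lower in key.lower():
--                 return value, key
--     return None, None
-- ===== Notes on version B (the rewrite author's own statement) =====
-- stated objective: simpler
-- what changed: Replaces the single max-tracking pass with running best_score/best_value/best_key state by three stateless priority-ordered scans (exact, then prefix, then substring) that each return the first hit.
import Mathlib
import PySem

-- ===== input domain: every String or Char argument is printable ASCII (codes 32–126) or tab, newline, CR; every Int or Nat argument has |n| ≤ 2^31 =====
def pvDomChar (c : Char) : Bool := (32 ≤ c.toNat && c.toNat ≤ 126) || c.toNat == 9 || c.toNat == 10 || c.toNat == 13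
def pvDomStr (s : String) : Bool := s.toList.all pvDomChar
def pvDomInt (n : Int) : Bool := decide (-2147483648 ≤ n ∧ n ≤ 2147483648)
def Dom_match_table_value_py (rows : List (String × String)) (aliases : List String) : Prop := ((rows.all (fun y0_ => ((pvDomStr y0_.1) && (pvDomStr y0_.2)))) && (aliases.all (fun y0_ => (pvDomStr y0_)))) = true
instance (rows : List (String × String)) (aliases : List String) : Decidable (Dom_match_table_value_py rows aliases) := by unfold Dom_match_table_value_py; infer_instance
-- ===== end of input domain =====

-- B replaces A's single max-tracking pass (running best score/value/key) by three
-- stateless priority-ordered scans (exact, prefix, substring), each returning its first hit.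

-- ===== PORT A =====
-- the if/elif score chain of A, on the already-lowered strings
def pvScoreA (aliasLower keyLower : String) : Nat :=
  if keyLower == aliasLower then 3
  else if PySem.Str.startswith keyLower (aliasLower ++ " ") then 2
  else if PySem.Str.isIn aliasLower keyLower then 1
  else 0

-- the inner 'for key, value in rows' loop; Sum.inl = the early 'return', Sum.inr = updated state
def pvInnerA (aliasLower : String) (rows : List (String × String))
    (bestScore : Nat) (bestValue bestKey : Option String) :
    (Option String × Option String) ⊕ (Nat × Option String × Option String) :=
  match rows with
  | [] => Sum.inr (bestScore, bestValue, bestKey)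
  | (key, value) :: rest =>
    if pvScoreA aliasLower (PySem.Str.lower key) > bestScore then
      if pvScoreA aliasLower (PySem.Str.lower key) == 3 then Sum.inl (some value, some key)
      else pvInnerA aliasLower rest (pvScoreA aliasLower (PySem.Str.lower key)) (some value) (some key)
    else pvInnerA aliasLower rest bestScore bestValue bestKey

-- the outer 'for alias in aliases' loop
def pvOuterA (rows : List (String × String)) (aliases : List String)
    (bestScore : Nat) (bestValue bestKey : Option String) : Option String × Option String :=
  match aliases with
  | [] => (bestValue, bestKey)
  | al0 :: rest =>
    match pvInnerA (PySem.Str.lower al0) rows bestScore bestValue bestKey with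
    | Sum.inl r => r
    | Sum.inr (bs, bv, bk) => pvOuterA rows rest bs bv bk

def match_table_value_py (rows : List (String × String)) (aliases : List String) : Option String × Option String :=
  pvOuterA rows aliases 0 none none

-- ===== PORT B =====
-- one staged scan: aliases outer, rows inner, first row whose lowered key satisfies p
def pvScan (rows : List (String × String)) (aliases : List String)
    (p : String → String → Bool) : Option (Option String × Option String) :=
  aliases.findSome? (fun al0 =>
    (rows.find? (fun r => p (PySem.Str.lower al0) (PySem.Str.lower r.1))).map
      (fun r => (some r.2, some r.1)))

def match_table_value_py_alt (rows : List (String × String)) (aliases : List String) : Option String × Option String :=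
  match pvScan rows aliases (fun al k => k == al) with
  | some r => r
  | none =>
    match pvScan rows aliases (fun al k => PySem.Str.startswith k (al ++ " ")) with
    | some r => r
    | none =>
      match pvScan rows aliases (fun al k => PySem.Str.isIn al k) with
      | some r => r
      | none => (none, none)

-- ===== PRECONDITION & SPEC =====
def Spec_match_table_value_py (rows : List (String × String)) (aliases : List String) (out : Option String × Option String) : Prop := out = match_table_value_py_alt rows aliases
instance (rows : List (String × String)) (aliases : List String) (out : Option String × Option String) : Decidable (Spec_match_table_value_py rows aliases out) := by unfold Spec_match_table_value_py; infer_instance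

-- ===== CLAIM (what is proved, stated in full; the proofs are below) =====
def Claim_equal_match_table_value_py : Prop := ∀ (rows : List (String × String)) (aliases : List String), Dom_match_table_value_py rows aliases → Spec_match_table_value_py rows aliases (match_table_value_py rows aliases)

-- ===== LEMMAS AND PROOFS =====

-- the three row-level predicates, on lowered strings
def pvP3 (al : String) : String × String → Bool := fun r => PySem.Str.lower r.1 == al
def pvP2 (al : String) : String × String → Bool := fun r => PySem.Str.startswith (PySem.Str.lower r.1) (al ++ " ")
def pvP1 (al : String) : String × String → Bool := fun r => PySem.Str.isIn al (PySem.Str.lower r.1)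

-- the inner find? of pvScan, at each of B's three predicates, is a pvP-find
lemma pv_find_eq3 (al0 : String) :
    (fun r : String × String => PySem.Str.lower r.1 == PySem.Str.lower al0) = pvP3 (PySem.Str.lower al0) := rfl
lemma pv_find_eq2 (al0 : String) :
    (fun r : String × String => PySem.Str.startswith (PySem.Str.lower r.1) (PySem.Str.lower al0 ++ " ")) = pvP2 (PySem.Str.lower al0) := rfl
lemma pv_find_eq1 (al0 : String) :
    (fun r : String × String => PySem.Str.isIn (PySem.Str.lower al0) (PySem.Str.lower r.1)) = pvP1 (PySem.Str.lower al0) := rfl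

-- what the inner loop computes, in staged form
lemma pvInnerA_spec (al : String) (rows : List (String × String))
    (bs : Nat) (bv bk : Option String) (h : bs ≤ 2) :
    pvInnerA al rows bs bv bk =
      match rows.find? (pvP3 al) with
      | some r => Sum.inl (some r.2, some r.1)
      | none =>
        Sum.inr (
          if bs < 2 then
            match rows.find? (pvP2 al) with
            | some r => (2, some r.2, some r.1)
            | none =>
              if bs < 1 then
                match rows.find? (pvP1 al) with
                | some r => (1, some r.2, some r.1)
                | none => (bs, bv, bk)
              else (bs, bv, bk)
          else (bs, bv, bk)) := by
  induction rows generalizing bs bv bk with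
  | nil => simp [pvInnerA]
  | cons hd rest ih =>
    obtain ⟨key, value⟩ := hd
    simp only [pvInnerA]
    by_cases h3 : (PySem.Str.lower key == al) = true
    · have hs : pvScoreA al (PySem.Str.lower key) = 3 := by unfold pvScoreA; rw [if_pos h3]
      rw [hs, if_pos (show 3 > bs by omega),
        List.find?_cons_of_pos (show pvP3 al (key, value) = true by simpa only [pvP3] using h3)]
      rfl
    · have hn3 : ¬ pvP3 al (key, value) = true := by simpa only [pvP3] using h3
      by_cases h2 : PySem.Str.startswith (PySem.Str.lower key) (al ++ " ") = true
      · have hs : pvScoreA al (PySem.Str.lower key) = 2 := by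
          unfold pvScoreA; rw [if_neg h3, if_pos h2]
        have hp2 : pvP2 al (key, value) = true := by simpa only [pvP2] using h2
        by_cases hb : bs < 2
        · rw [hs, if_pos (show 2 > bs by omega)]
          simp only [show ((2 : Nat) == 3) = false from rfl, Bool.false_eq_true, if_false]
          rw [ih _ _ _ (by omega), List.find?_cons_of_neg hn3,
            List.find?_cons_of_pos hp2]
          cases rest.find? (pvP3 al) <;> simp [hb]
        · have hbs : bs = 2 := by omega
          rw [hs, if_neg (by omega), ih _ _ _ h, List.find?_cons_of_neg hn3]
          subst hbs
          cases rest.find? (pvP3 al) <;> simp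
      · have hn2 : ¬ pvP2 al (key, value) = true := by simpa only [pvP2] using h2
        by_cases h1 : PySem.Str.isIn al (PySem.Str.lower key) = true
        · have hs : pvScoreA al (PySem.Str.lower key) = 1 := by
            unfold pvScoreA; rw [if_neg h3, if_neg h2, if_pos h1]
          have hp1 : pvP1 al (key, value) = true := by simpa only [pvP1] using h1
          by_cases hb : bs < 1
          · have hbs : bs = 0 := by omega
            rw [hs, if_pos (show 1 > bs by omega)]
            simp only [show ((1 : Nat) == 3) = false from rfl, Bool.false_eq_true, if_false]
            rw [ih _ _ _ (by omega), List.find?_cons_of_neg hn3,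
              List.find?_cons_of_neg hn2, List.find?_cons_of_pos hp1]
            subst hbs
            cases rest.find? (pvP3 al) <;> simp
          · rw [hs, if_neg (by omega), ih _ _ _ h, List.find?_cons_of_neg hn3,
              List.find?_cons_of_neg hn2]
            cases rest.find? (pvP3 al) <;> simp
            cases rest.find? (pvP2 al) <;> simp [show ¬ bs = 0 by omega]
        · have hn1 : ¬ pvP1 al (key, value) = true := by simpa only [pvP1] using h1
          have hs : pvScoreA al (PySem.Str.lower key) = 0 := by
            unfold pvScoreA; rw [if_neg h3, if_neg h2, if_neg h1]
          rw [hs, if_neg (by omega), ih _ _ _ h, List.find?_cons_of_neg hn3,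
            List.find?_cons_of_neg hn2, List.find?_cons_of_neg hn1]

-- one cons step of each of B's three staged scans
lemma pvScan_cons (rows : List (String × String)) (al0 : String) (rest : List String)
    (p : String → String → Bool) :
    pvScan rows (al0 :: rest) p =
      match rows.find? (fun r => p (PySem.Str.lower al0) (PySem.Str.lower r.1)) with
      | some r => some (some r.2, some r.1)
      | none => pvScan rows rest p := by
  simp only [pvScan, List.findSome?_cons]
  cases rows.find? (fun r => p (PySem.Str.lower al0) (PySem.Str.lower r.1)) <;> simp

-- what the outer loop computes, in staged form
lemma pvOuterA_spec (rows : List (String × String)) (aliases : List String)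
    (bs : Nat) (bv bk : Option String) (h : bs ≤ 2) :
    pvOuterA rows aliases bs bv bk =
      match pvScan rows aliases (fun al k => k == al) with
      | some r => r
      | none =>
        if bs < 2 then
          match pvScan rows aliases (fun al k => PySem.Str.startswith k (al ++ " ")) with
          | some r => r
          | none =>
            if bs < 1 then
              match pvScan rows aliases (fun al k => PySem.Str.isIn al k) with
              | some r => r
              | none => (bv, bk)
            else (bv, bk)
        else (bv, bk) := by
  induction aliases generalizing bs bv bk with
  | nil =>
    simp only [pvOuterA, pvScan, List.findSome?_nil]
    split <;> [skip; rfl]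
    split <;> rfl
  | cons al0 rest ih =>
    simp only [pvOuterA]
    rw [pvInnerA_spec _ _ _ _ _ h]
    rw [pvScan_cons rows al0 rest (fun al k => k == al), pv_find_eq3,
      pvScan_cons rows al0 rest (fun al k => PySem.Str.startswith k (al ++ " ")), pv_find_eq2,
      pvScan_cons rows al0 rest (fun al k => PySem.Str.isIn al k), pv_find_eq1]
    cases hf3 : rows.find? (pvP3 (PySem.Str.lower al0)) with
    | some r => rfl
    | none =>
      dsimp only
      cases hf2 : rows.find? (pvP2 (PySem.Str.lower al0)) with
      | some r =>
        dsimp only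
        by_cases hb : bs < 2
        · rw [if_pos hb, ih _ _ _ (by omega), if_pos hb]
          cases pvScan rows rest (fun al k => k == al) <;> simp
        · have hbs : bs = 2 := by omega
          rw [if_neg hb, ih _ _ _ h, if_neg hb]
          subst hbs
          cases pvScan rows rest (fun al k => k == al) <;> simp
      | none =>
        dsimp only
        cases hf1 : rows.find? (pvP1 (PySem.Str.lower al0)) with
        | some r =>
          dsimp only
          by_cases hb : bs < 1
          · have hbs : bs = 0 := by omega
            rw [if_pos (by omega), if_pos hb, ih _ _ _ (by omega), if_pos (by omega)]
            subst hbs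
            cases pvScan rows rest (fun al k => k == al) <;> simp
          · have hif : (if bs < 2 then (match (none : Option (String × String)) with
                | some r => ((2 : Nat), some r.2, some r.1)
                | none =>
                  if bs < 1 then
                    match some r with
                    | some r => ((1 : Nat), some r.2, some r.1)
                    | none => (bs, bv, bk)
                  else (bs, bv, bk)) else (bs, bv, bk)) = (bs, bv, bk) := by
              split <;> simp
            rw [hif, ih _ _ _ h]
            cases pvScan rows rest (fun al k => k == al) <;> simp
            cases pvScan rows rest (fun al k => PySem.Str.startswith k (al ++ " ")) <;>
              simp [show ¬ bs = 0 by omega]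
        | none =>
          dsimp only
          have hif : (if bs < 2 then (match (none : Option (String × String)) with
                | some r => ((2 : Nat), some r.2, some r.1)
                | none =>
                  if bs < 1 then
                    match (none : Option (String × String)) with
                    | some r => ((1 : Nat), some r.2, some r.1)
                    | none => (bs, bv, bk)
                  else (bs, bv, bk)) else (bs, bv, bk)) = (bs, bv, bk) := by
            split <;> simp
          rw [hif, ih _ _ _ h]

-- ===== VERDICT (by name: the statement is the Claim_ definition above) =====
theorem match_table_value_py_spec : Claim_equal_match_table_value_py := by
  intro rows aliases _
  unfold Spec_match_table_value_py match_table_value_py match_table_value_py_alt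
  rw [pvOuterA_spec _ _ _ _ _ (by omega)]
  cases pvScan rows aliases (fun al k => k == al) <;> simp
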